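-- pv_equiv track=rewrite | github.com/bingzhilee/SLOG | data_generation_scripts/varfree2cogs_converter/convert_varfree_to_cogs.py | replace_tokens_with_indexes
-- ===== SOURCE A (Python) =====
-- def replace_tokens_with_indexes(tokens,lf):
--     """Iteratively replace tokens in the variable-free logical form with their respective indexes in the sentence
--     to address issues with identical verbs.  Datasets generated using `alto-2.3.9-SNAPSHOT-all.jar` avoid this issue
--     by filtering out sentences with duplicate lemmas during the generation process.
--     """
--     words_in_lf = lf.split()
--     res_lf = ""
--     token_index = 0
--     for word in words_in_lf:
--         if word in tokens[token_index:] and word not in ("in","on","beside"):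
--             idx = tokens.index(word, token_index)
--             res_lf += str(idx) + " "
--             token_index = idx + 1
--         else:
--             res_lf += word + " "
--     return res_lf.strip()
-- ===== SOURCE B (Python) =====
-- def replace_tokens_with_indexes(tokens, lf):
--     """Index each token's positions once, then binary-search each lf word's
--     position list for the first position >= token_index, instead of slicing and
--     scanning the token list per word."""
--     pos = {}
--     for i, tok in enumerate(tokens):
--         pos.setdefault(tok, []).append(i)
--     out = []
--     token_index = 0
--     for word in lf.split():
--         if word not in ("in", "on", "beside"):
--             ps = pos.get(word, [])
--             lo, hi = 0, len(ps)
--             while lo < hi: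
--                 mid = (lo + hi) // 2
--                 if ps[mid] < token_index:
--                     lo = mid + 1
--                 else:
--                     hi = mid
--             if lo < len(ps):
--                 out.append(str(ps[lo]))
--                 token_index = ps[lo] + 1
--                 continue
--         out.append(word)
--     return " ".join(out)
-- ===== Notes on version B (the rewrite author's own statement) =====
-- stated objective: alternative
-- what changed: Instead of slicing tokens[token_index:] and scanning it twice per lf word (membership test plus list.index), B builds a token->sorted-positions dict once and binary-searches each word's position list for the first position >= token_index, emitting the words into a list joined at the end instead of appending to a string and stripping.
import Mathlib
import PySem

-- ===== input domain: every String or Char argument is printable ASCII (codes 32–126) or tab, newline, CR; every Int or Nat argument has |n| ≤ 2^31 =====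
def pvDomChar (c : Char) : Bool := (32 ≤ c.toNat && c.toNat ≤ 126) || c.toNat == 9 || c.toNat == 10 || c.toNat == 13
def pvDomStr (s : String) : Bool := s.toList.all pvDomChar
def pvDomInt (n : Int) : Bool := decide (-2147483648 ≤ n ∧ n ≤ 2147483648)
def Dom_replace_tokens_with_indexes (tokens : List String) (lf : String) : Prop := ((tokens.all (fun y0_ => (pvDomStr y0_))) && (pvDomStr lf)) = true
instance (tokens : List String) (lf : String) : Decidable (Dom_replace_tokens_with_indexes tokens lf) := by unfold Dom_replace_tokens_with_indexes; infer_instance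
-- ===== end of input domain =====

-- B replaces A's per-word slice-and-rescan of `tokens` by a positions index built once
-- plus a binary search per word, and joins the output words instead of strip-after-append
-- (objective: alternative algorithm; not measured faster on a timing run's inputs).

-- ===== PORT A =====
-- Loop body of A.  `tokens.index(word, token_index)` is ported as token_index plus the
-- first index of word in the slice tokens[token_index:]; exact here because Python only
-- reaches the call after `word in tokens[token_index:]` succeeded.
def stepA (tokens : List String) (st : String × Nat) (word : String) : String × Nat :=
  if word ∈ PySem.List.slice tokens (some (st.2 : Int)) none ∧ word ∉ (["in", "on", "beside"] : List String) then
    let idx := st.2 + (PySem.List.index? (PySem.List.slice tokens (some (st.2 : Int)) none) word).getD 0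
    (st.1 ++ PySem.Int.toStr (idx : Int) ++ " ", idx + 1)
  else
    (st.1 ++ word ++ " ", st.2)

def replace_tokens_with_indexes (tokens : List String) (lf : String) : String :=
  PySem.Str.strip ((PySem.Str.split₀ lf).foldl (stepA tokens) ("", 0)).1

-- ===== PORT B =====
-- `for i, tok in enumerate(tokens): pos.setdefault(tok, []).append(i)`
def buildPos (tokens : List String) : PySem.Dict String (List Int) :=
  (PySem.List.enumerate tokens).foldl
    (fun (d : PySem.Dict String (List Int)) p => d.modify p.2 [] (· ++ [p.1])) PySem.Dict.empty

-- Source B's hand-written binary search (`while lo < hi: …`); ps[mid] is in range whenever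
-- lo ≤ hi ≤ len ps, which the callers guarantee, so it is ported with pyGetD.
def altBisect (ps : List Int) (t : Int) (lo hi : Nat) : Nat :=
  if _h : lo < hi then
    let mid := (lo + hi) / 2   -- (lo+hi)//2 on nonnegative operands: Nat division is exact
    if PySem.List.pyGetD ps (mid : Int) 0 < t then altBisect ps t (mid + 1) hi
    else altBisect ps t lo mid
  else lo
termination_by hi - lo
decreasing_by all_goals omega

-- Loop body of B
def stepB (pos : PySem.Dict String (List Int)) (st : List String × Int) (word : String) : List String × Int :=
  if word ∈ (["in", "on", "beside"] : List String) then (st.1 ++ [word], st.2)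
  else
    let ps := pos.getD word []
    let lo := altBisect ps st.2 0 ps.length
    if lo < ps.length then
      (st.1 ++ [PySem.Int.toStr (PySem.List.pyGetD ps (lo : Int) 0)], PySem.List.pyGetD ps (lo : Int) 0 + 1)
    else (st.1 ++ [word], st.2)

def replace_tokens_with_indexes_alt (tokens : List String) (lf : String) : String :=
  let pos := buildPos tokens
  PySem.Str.join " " ((PySem.Str.split₀ lf).foldl (stepB pos) ([], 0)).1

-- ===== PRECONDITION & SPEC =====
def Spec_replace_tokens_with_indexes (tokens : List String) (lf : String) (out : String) : Prop := out = replace_tokens_with_indexes_alt tokens lf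
instance (tokens : List String) (lf : String) (out : String) : Decidable (Spec_replace_tokens_with_indexes tokens lf out) := by unfold Spec_replace_tokens_with_indexes; infer_instance

-- ===== CLAIM (what is proved, stated in full; the proofs are below) =====
def Claim_equal_replace_tokens_with_indexes : Prop := ∀ (tokens : List String) (lf : String), Dom_replace_tokens_with_indexes tokens lf → Spec_replace_tokens_with_indexes tokens lf (replace_tokens_with_indexes tokens lf)

-- ===== LEMMAS AND PROOFS =====

-- positions (labelled from s) at which w occurs in a token list
def posFrom (s : Int) : List String → String → List Int
  | [], _ => []
  | x :: xs, w => if x = w then s :: posFrom (s + 1) xs w else posFrom (s + 1) xs w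

-- the common word-by-word behaviour of both loops: output words and final token_index
def outWT (tokens : List String) : Nat → List String → List String × Nat
  | t, [] => ([], t)
  | t, w :: ws =>
    if w ∈ tokens.drop t ∧ w ∉ (["in", "on", "beside"] : List String) then
      let idx := t + (tokens.drop t).idxOf w
      let r := outWT tokens (idx + 1) ws
      (PySem.Int.toStr (idx : Int) :: r.1, r.2)
    else
      let r := outWT tokens t ws
      (w :: r.1, r.2)


def goodW (w : List Char) : Prop := w ≠ [] ∧ ∀ c ∈ w, PySem.Chars.isspace c = false

theorem posFrom_mem_le (w : String) : ∀ (xs : List String) (s : Int), ∀ p ∈ posFrom s xs w, s ≤ p := by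
  intro xs
  induction xs with
  | nil => intro s p hp; simp [posFrom] at hp
  | cons x xs ih =>
    intro s p hp
    simp only [posFrom] at hp
    split at hp
    · rcases List.mem_cons.1 hp with h | h
      · omega
      · have := ih (s+1) p h; omega
    · have := ih (s+1) p hp; omega

theorem posFrom_dropWhile (w : String) : ∀ (xs : List String) (n : Nat) (s : Int),
    (posFrom s xs w).dropWhile (fun p => p < s + (n : Int)) = posFrom (s + (n : Int)) (xs.drop n) w := by
  intro xs
  induction xs with
  | nil => intro n s; simp [posFrom]
  | cons x xs ih =>
    intro n s
    cases n with
    | zero =>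
      simp only [Nat.cast_zero, add_zero, List.drop_zero]
      cases hl : posFrom s (x :: xs) w with
      | nil => simp
      | cons a l =>
        have ha : s ≤ a := posFrom_mem_le w (x :: xs) s a (by rw [hl]; exact List.mem_cons_self)
        rw [List.dropWhile_cons_of_neg (by simp; omega)]
    | succ m =>
      have hfun : (fun p : Int => decide (p < s + ((m+1:Nat) : Int))) = (fun p : Int => decide (p < (s+1) + (m : Int))) := by
        funext p; simp only [decide_eq_decide]; push_cast; omega
      have harith : s + ((m+1:Nat):Int) = (s+1) + (m:Int) := by push_cast; omega
      simp only [posFrom, List.drop_succ_cons, hfun, harith]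
      split
      · rw [List.dropWhile_cons_of_pos (by simp; push_cast; omega)]
        exact ih m (s+1)
      · exact ih m (s+1)

theorem posFrom_nil_iff (w : String) : ∀ (xs : List String) (s : Int), posFrom s xs w = [] ↔ w ∉ xs := by
  intro xs
  induction xs with
  | nil => intro s; simp [posFrom]
  | cons x xs ih =>
    intro s
    simp only [posFrom, List.mem_cons]
    split
    · simp_all
    · rw [ih (s+1)]
      rename_i hx
      constructor
      · rintro h (h1 | h2)
        · exact hx h1.symm
        · exact h h2
      · intro h h2; exact h (Or.inr h2)

theorem posFrom_head (w : String) : ∀ (xs : List String) (s : Int), w ∈ xs →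
    (posFrom s xs w).head? = some (s + ((xs.idxOf w : Nat) : Int)) := by
  intro xs
  induction xs with
  | nil => intro s h; simp at h
  | cons x xs ih =>
    intro s h
    simp only [posFrom]
    by_cases hx : x = w
    · subst hx; simp [List.idxOf_cons_self]
    · rw [if_neg hx, List.idxOf_cons_ne _ (by simpa using hx)]
      rcases List.mem_cons.1 h with h1 | h2
      · exact absurd h1.symm hx
      · rw [ih (s+1) h2]; congr 1; push_cast; omega

theorem enum_filter (w : String) : ∀ (xs : List String) (s : Int),
    (((PySem.List.enumerate xs s).map Prod.swap).filter (fun p => p.1 == w)).map Prod.snd = posFrom s xs w := by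
  intro xs
  induction xs with
  | nil => intro s; simp [PySem.List.enumerate, posFrom]
  | cons x xs ih =>
    intro s
    rw [PySem.List.enumerate_cons]
    simp only [List.map_cons, Prod.swap_prod_mk, List.filter_cons, posFrom]
    by_cases hx : x = w
    · simp [hx, ih (s+1)]
    · simp [hx, ih (s+1)]

theorem buildPos_getD (tokens : List String) (w : String) :
    (buildPos tokens).getD w [] = posFrom 0 tokens w := by
  unfold buildPos
  have : (PySem.List.enumerate tokens).foldl
      (fun (d : PySem.Dict String (List Int)) p => d.modify p.2 [] (· ++ [p.1])) PySem.Dict.empty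
      = ((PySem.List.enumerate tokens).map Prod.swap).foldl
      (fun (d : PySem.Dict String (List Int)) p => d.modify p.1 [] (· ++ [p.2])) PySem.Dict.empty := by
    rw [List.foldl_map]
    rfl
  rw [this, PySem.Dict.getD_foldl_modify_append]
  simp [enum_filter w tokens 0]

theorem altBisect_spec (ps : List Int) (t : Int) (hs : ps.Pairwise (· ≤ ·)) :
    ∀ (lo hi : Nat), lo ≤ hi → hi ≤ ps.length →
    (∀ j (hj : j < ps.length), j < lo → ps[j] < t) →
    (∀ j (hj : j < ps.length), hi ≤ j → t ≤ ps[j]) →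
    altBisect ps t lo hi ≤ ps.length ∧
    (∀ j (hj : j < ps.length), j < altBisect ps t lo hi → ps[j] < t) ∧
    (∀ j (hj : j < ps.length), altBisect ps t lo hi ≤ j → t ≤ ps[j]) := by
  have hmono := List.pairwise_iff_getElem.1 hs
  intro lo hi
  induction lo, hi using altBisect.induct ps t with
  | case1 lo hi h mid hlt ih =>
    intro hle hhi hlo hge
    rw [altBisect, dif_pos h, if_pos hlt]
    simp only at hlt ih ⊢
    have hmidlen : (lo + hi) / 2 < ps.length := by omega
    have hmidval : PySem.List.pyGetD ps (((lo + hi) / 2 : Nat) : Int) 0 = ps[(lo + hi) / 2] := by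
      rw [PySem.List.pyGetD_natCast, List.getD_eq_getElem ps 0 hmidlen]
    apply ih (by omega) hhi
    · intro j hj hjlt
      by_cases hjlo : j < lo
      · exact hlo j hj hjlo
      · have : ps[j] ≤ ps[(lo + hi) / 2] := by
          rcases Nat.lt_or_ge j ((lo + hi) / 2) with hc | hc
          · exact hmono j ((lo+hi)/2) hj hmidlen hc
          · have : j = (lo + hi) / 2 := by omega
            simp [this]
        rw [hmidval] at hlt
        omega
    · exact hge
  | case2 lo hi h mid hlt ih =>
    intro hle hhi hlo hge
    rw [altBisect, dif_pos h, if_neg hlt]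
    simp only at hlt ih ⊢
    have hmidlen : (lo + hi) / 2 < ps.length := by omega
    have hmidval : PySem.List.pyGetD ps (((lo + hi) / 2 : Nat) : Int) 0 = ps[(lo + hi) / 2] := by
      rw [PySem.List.pyGetD_natCast, List.getD_eq_getElem ps 0 hmidlen]
    apply ih (by omega) (by omega) hlo
    intro j hj hjge
    have : ps[(lo + hi) / 2] ≤ ps[j] := by
      rcases Nat.lt_or_ge ((lo + hi) / 2) j with hc | hc
      · exact hmono ((lo+hi)/2) j hmidlen hj hc
      · have : (lo + hi) / 2 = j := by omega
        simp [this]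
    rw [hmidval] at hlt
    omega
  | case3 lo hi h =>
    intro hle hhi hlo hge
    rw [altBisect, dif_neg h]
    have hlohi : lo = hi ∨ lo < hi := by omega
    refine ⟨by omega, fun j hj hjlt => hlo j hj hjlt, fun j hj hjge => hge j hj (by omega)⟩

theorem dropWhile_eq_drop_of (ps : List Int) (t : Int) :
    ∀ (r : Nat), r ≤ ps.length → (∀ j (hj : j < ps.length), j < r → ps[j] < t) →
    (∀ j (hj : j < ps.length), r ≤ j → t ≤ ps[j]) →
    ps.dropWhile (fun p => p < t) = ps.drop r := by
  induction ps with
  | nil => intro r h _ _; simp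
  | cons a l ih =>
    intro r hr hlt hge
    cases r with
    | zero =>
      have := hge 0 (by simp) (by omega)
      simp at this
      rw [List.dropWhile_cons_of_neg (by simp; omega), List.drop_zero]
    | succ m =>
      have := hlt 0 (by simp) (by omega)
      simp at this
      rw [List.dropWhile_cons_of_pos (by simp; omega), List.drop_succ_cons]
      apply ih m (by simpa using hr)
      · intro j hj hjm
        have := hlt (j+1) (by simpa using hj) (by omega)
        simpa using this
      · intro j hj hjm
        have := hge (j+1) (by simpa using hj) (by omega)
        simpa using this

theorem posFrom_sorted (w : String) : ∀ (xs : List String) (s : Int), (posFrom s xs w).Pairwise (· ≤ ·) := by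
  intro xs
  induction xs with
  | nil => intro s; simp [posFrom]
  | cons x xs ih =>
    intro s
    simp only [posFrom]
    split
    · exact List.Pairwise.cons (fun p hp => by have := posFrom_mem_le w xs (s+1) p hp; omega) (ih (s+1))
    · exact ih (s+1)

-- the suffix of a word's position list from token_index t onward
theorem drop_bisect (tokens : List String) (w : String) (t : Nat) :
    (posFrom 0 tokens w).drop (altBisect (posFrom 0 tokens w) (t : Int) 0 (posFrom 0 tokens w).length)
      = posFrom (t : Int) (tokens.drop t) w := by
  set ps := posFrom 0 tokens w with hps
  have hs := posFrom_sorted w tokens 0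
  obtain ⟨hr, hlt, hge⟩ := altBisect_spec ps (t : Int) hs 0 ps.length (by omega) (le_refl _)
    (by intro j hj hjlt; omega) (by intro j hj hjge; omega)
  have h1 : ps.dropWhile (fun p => p < (t : Int)) = ps.drop (altBisect ps (t : Int) 0 ps.length) :=
    dropWhile_eq_drop_of ps (t : Int) _ hr hlt hge
  have h2 := posFrom_dropWhile w tokens t 0
  rw [zero_add] at h2
  rw [← hps] at h2
  rw [h1] at h2
  exact h2

theorem foldB_spec (tokens : List String) : ∀ (ws : List String) (out : List String) (t : Nat),
    ws.foldl (stepB (buildPos tokens)) (out, (t : Int)) =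
      (out ++ (outWT tokens t ws).1, ((outWT tokens t ws).2 : Int)) := by
  intro ws
  induction ws with
  | nil => intro out t; simp [outWT]
  | cons w ws ih =>
    intro out t
    rw [List.foldl_cons]
    by_cases hb : w ∈ (["in", "on", "beside"] : List String)
    · rw [show stepB (buildPos tokens) (out, (t:Int)) w = (out ++ [w], (t:Int)) from by
        simp [stepB, hb]]
      rw [ih (out ++ [w]) t]
      have hcond : ¬ (w ∈ tokens.drop t ∧ w ∉ (["in", "on", "beside"] : List String)) := by
        intro h; exact h.2 hb
      simp only [outWT, if_neg hcond]
      simp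
    · have hps : (buildPos tokens).getD w [] = posFrom 0 tokens w := buildPos_getD tokens w
      set ps := posFrom 0 tokens w with hpsdef
      set r := altBisect ps (t : Int) 0 ps.length with hrdef
      have hdrop := drop_bisect tokens w t
      rw [← hpsdef, ← hrdef] at hdrop
      by_cases hmem : w ∈ tokens.drop t
      · have hne : posFrom (t : Int) (tokens.drop t) w ≠ [] := by
          rw [Ne, posFrom_nil_iff]; simpa using hmem
        have hrlen : r < ps.length := by
          by_contra hge
          rw [← hdrop] at hne
          exact hne (List.drop_eq_nil_of_le (by omega))
        have hhead : ps[r] = (t : Int) + ((tokens.drop t).idxOf w : Int) := by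
          have h1 : (ps.drop r).head? = some ((t : Int) + ((tokens.drop t).idxOf w : Int)) := by
            rw [hdrop]; exact posFrom_head w (tokens.drop t) (t : Int) hmem
          rw [List.head?_drop, List.getElem?_eq_getElem hrlen] at h1
          exact Option.some.inj h1
        have hstep : stepB (buildPos tokens) (out, (t:Int)) w =
            (out ++ [PySem.Int.toStr ((t : Int) + ((tokens.drop t).idxOf w : Int))],
              (t : Int) + ((tokens.drop t).idxOf w : Int) + 1) := by
          simp only [stepB, if_neg hb, hps, ← hpsdef, ← hrdef, if_pos hrlen]
          rw [PySem.List.pyGetD_natCast, List.getD_eq_getElem ps 0 hrlen, hhead]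
        rw [hstep]
        have hc2 : (t : Int) + ((tokens.drop t).idxOf w : Int)
            = ((t + (tokens.drop t).idxOf w : Nat) : Int) := by push_cast; ring
        have hc3 : ((t + (tokens.drop t).idxOf w : Nat) : Int) + 1
            = ((t + (tokens.drop t).idxOf w + 1 : Nat) : Int) := by push_cast; ring
        rw [hc2, hc3, ih _ (t + (tokens.drop t).idxOf w + 1)]
        have hcond : w ∈ tokens.drop t ∧ w ∉ (["in", "on", "beside"] : List String) := ⟨hmem, hb⟩
        simp only [outWT, if_pos hcond]
        simp
      · have hnil : posFrom (t : Int) (tokens.drop t) w = [] := by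
          rw [posFrom_nil_iff]; simpa using hmem
        have hrlen : ¬ r < ps.length := by
          intro hlt
          have : ps.drop r ≠ [] := by
            intro hnilp
            have := List.drop_eq_nil_iff.1 hnilp
            omega
          rw [hdrop] at this
          exact this hnil
        have hstep : stepB (buildPos tokens) (out, (t:Int)) w = (out ++ [w], (t:Int)) := by
          simp only [stepB, if_neg hb, hps, ← hpsdef, ← hrdef, if_neg hrlen]
        rw [hstep, ih (out ++ [w]) t]
        have hcond : ¬ (w ∈ tokens.drop t ∧ w ∉ (["in", "on", "beside"] : List String)) := by
          intro h; exact hmem h.1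
        simp only [outWT, if_neg hcond]
        simp

theorem foldA_spec (tokens : List String) : ∀ (ws : List String) (s : String) (t : Nat),
    ((ws.foldl (stepA tokens) (s, t)).1.toList =
      s.toList ++ ((outWT tokens t ws).1.map (fun w => w.toList ++ [' '])).flatten) ∧
    (ws.foldl (stepA tokens) (s, t)).2 = (outWT tokens t ws).2 := by
  intro ws
  induction ws with
  | nil => intro s t; simp [outWT]
  | cons w ws ih =>
    intro s t
    rw [List.foldl_cons]
    have hslice : PySem.List.slice tokens (some ((t : Nat) : Int)) none = tokens.drop t :=
      PySem.List.slice_from_natCast tokens t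
    by_cases hcond : w ∈ tokens.drop t ∧ w ∉ (["in", "on", "beside"] : List String)
    · have hidx : (PySem.List.index? (tokens.drop t) w).getD 0 = (tokens.drop t).idxOf w := by
        rw [PySem.List.index?_eq_idxOf?]
        rcases ho : (tokens.drop t).idxOf? w with _ | k
        · rw [List.idxOf?_eq_none_iff] at ho; exact absurd hcond.1 ho
        · have h2 := List.idxOf_eq_getD_idxOf? (a := w) (l := tokens.drop t)
          rw [ho] at h2
          simp [h2, ho]
      have hstep : stepA tokens (s, t) w =
          (s ++ PySem.Int.toStr ((t + (tokens.drop t).idxOf w : Nat) : Int) ++ " ",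
            t + (tokens.drop t).idxOf w + 1) := by
        simp only [stepA, hslice, if_pos hcond, hidx]
      rw [hstep]
      obtain ⟨ha, hb⟩ := ih (s ++ PySem.Int.toStr ((t + (tokens.drop t).idxOf w : Nat) : Int) ++ " ") (t + (tokens.drop t).idxOf w + 1)
      refine ⟨?_, ?_⟩
      · rw [ha]
        simp only [outWT, if_pos hcond, List.map_cons, List.flatten_cons]
        simp [String.toList_append]
      · rw [hb]
        simp only [outWT, if_pos hcond]
    · have hstep : stepA tokens (s, t) w = (s ++ w ++ " ", t) := by
        simp only [stepA, hslice]
        rw [if_neg hcond]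
      rw [hstep]
      obtain ⟨ha, hb⟩ := ih (s ++ w ++ " ") t
      refine ⟨?_, ?_⟩
      · rw [ha]
        simp only [outWT, if_neg hcond, List.map_cons, List.flatten_cons]
        simp [String.toList_append]
      · rw [hb]
        simp only [outWT, if_neg hcond]

theorem split₀go_good : ∀ (s cur acc : _),
    (∀ c ∈ cur, PySem.Chars.isspace c = false) →
    (∀ w ∈ acc, goodW w) →
    ∀ w ∈ PySem.Chars.split₀.go s cur acc, goodW w := by
  intro s
  induction s with
  | nil =>
    intro cur acc hcur hacc w hw
    rw [PySem.Chars.split₀.go] at hw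
    split at hw
    · exact hacc w (List.mem_reverse.1 hw)
    · have hw' := List.mem_reverse.1 hw
      rcases List.mem_cons.1 hw' with h | h
      · subst h
        refine ⟨by simpa [List.isEmpty_iff] using ‹¬ cur.isEmpty = true›, ?_⟩
        intro c hc; exact hcur c (List.mem_reverse.1 hc)
      · exact hacc w h
  | cons c rest ih =>
    intro cur acc hcur hacc w hw
    rw [PySem.Chars.split₀.go] at hw
    split at hw
    · split at hw
      · exact ih [] acc (by simp) hacc w hw
      · refine ih [] (cur.reverse :: acc) (by simp) ?_ w hw
        intro v hv
        rcases List.mem_cons.1 hv with h | h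
        · subst h
          refine ⟨by simpa [List.isEmpty_iff] using ‹¬ cur.isEmpty = true›, ?_⟩
          intro d hd; exact hcur d (List.mem_reverse.1 hd)
        · exact hacc v h
    · refine ih (c :: cur) acc ?_ hacc w hw
      intro d hd
      rcases List.mem_cons.1 hd with h | h
      · have hns := ‹¬ PySem.Chars.isspace c = true›
        subst h; simpa using hns
      · exact hcur d h

theorem split₀_good (lf : String) : ∀ w ∈ PySem.Str.split₀ lf, goodW w.toList := by
  intro w hw
  simp only [PySem.Str.split₀, List.mem_map] at hw
  obtain ⟨cs, hcs, rfl⟩ := hw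
  rw [String.toList_ofList]
  exact split₀go_good lf.toList [] [] (by simp) (by simp) cs (by simpa [PySem.Chars.split₀] using hcs)

theorem isspace_of_isDigit (c : Char) (h : c.isDigit = true) : PySem.Chars.isspace c = false := by
  simp [Char.isDigit] at h
  obtain ⟨h1, h2⟩ := h
  have h1' : 48 ≤ c.toNat := h1
  have h2' : c.toNat ≤ 57 := h2
  simp [PySem.Chars.isspace]
  omega

theorem toStr_good (n : Int) (hn : 0 ≤ n) : goodW (PySem.Int.toStr n).toList := by
  rw [PySem.Int.toList_toStr]
  rw [PySem.Int.toChars, if_neg (by omega)]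
  constructor
  · intro h
    have := Nat.length_toDigits_pos (b := 10) (n := n.toNat)
    rw [h] at this
    simp at this
  · intro c hc
    exact isspace_of_isDigit c (Nat.isDigit_of_mem_toDigits (by omega) (by omega) hc)

theorem outWT_good (tokens : List String) : ∀ (ws : List String) (t : Nat),
    (∀ w ∈ ws, goodW w.toList) → ∀ w ∈ (outWT tokens t ws).1, goodW w.toList := by
  intro ws
  induction ws with
  | nil => intro t h w hw; simp [outWT] at hw
  | cons x xs ih =>
    intro t h w hw
    simp only [outWT] at hw
    split at hw
    · rcases List.mem_cons.1 hw with hh | hh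
      · subst hh; exact toStr_good _ (by positivity)
      · exact ih _ (fun v hv => h v (List.mem_cons_of_mem _ hv)) w hh
    · rcases List.mem_cons.1 hw with hh | hh
      · subst hh; exact h w List.mem_cons_self
      · exact ih _ (fun v hv => h v (List.mem_cons_of_mem _ hv)) w hh

theorem flat_eq_join_sp : ∀ (L : List (List Char)), L ≠ [] →
    (L.map (· ++ [' '])).flatten = PySem.Chars.join [' '] L ++ [' '] := by
  intro L
  induction L with
  | nil => intro h; simp at h
  | cons w L ih =>
    intro _
    cases L with
    | nil => simp [PySem.Chars.join_singleton]
    | cons v L' =>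
      simp only [List.map_cons, List.flatten_cons] at *
      rw [ih (by simp), PySem.Chars.join_cons_cons]
      simp

theorem lstrip_of_head (w : List Char) (cs : List Char) (hw : goodW w) :
    PySem.Chars.lstrip (w ++ cs) = w ++ cs := by
  obtain ⟨hne, hns⟩ := hw
  cases w with
  | nil => exact absurd rfl hne
  | cons a w' =>
    simp only [PySem.Chars.lstrip, List.cons_append]
    rw [List.dropWhile_cons_of_neg (by simp [hns a List.mem_cons_self])]

theorem rstrip_append_sp (J : List Char) :
    PySem.Chars.rstrip (J ++ [' ']) = PySem.Chars.rstrip J := by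
  simp only [PySem.Chars.rstrip, List.reverse_append, List.reverse_cons, List.reverse_nil,
    List.nil_append, List.singleton_append]
  rw [List.dropWhile_cons_of_pos (by simp [PySem.Chars.isspace])]

theorem rstrip_of_all_nonspace (w : List Char) (hns : ∀ c ∈ w, PySem.Chars.isspace c = false) :
    PySem.Chars.rstrip w = w := by
  simp only [PySem.Chars.rstrip]
  cases hw : w.reverse with
  | nil =>
    have : w = [] := List.reverse_eq_nil_iff.1 hw
    simp [this]
  | cons a l =>
    have ha : a ∈ w := by rw [← List.mem_reverse, hw]; exact List.mem_cons_self
    rw [List.dropWhile_cons_of_neg (by simp [hns a ha])]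
    rw [← hw, List.reverse_reverse]

theorem rstrip_append_of_nonspace (as bs : List Char)
    (h : PySem.Chars.rstrip bs ≠ []) :
    PySem.Chars.rstrip (as ++ bs) = as ++ PySem.Chars.rstrip bs := by
  simp only [PySem.Chars.rstrip, List.reverse_append] at *
  rw [List.dropWhile_append, if_neg ?_]
  · simp
  · simp only [List.isEmpty_iff]
    intro hnil
    rw [hnil] at h
    simp at h

theorem join_ne_nil (L : List (List Char)) (hL : L ≠ []) (hg : ∀ w ∈ L, goodW w) :
    PySem.Chars.join [' '] L ≠ [] := by
  cases L with
  | nil => exact absurd rfl hL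
  | cons w L' =>
    cases L' with
    | nil =>
      rw [PySem.Chars.join_singleton]
      exact (hg w List.mem_cons_self).1
    | cons v L'' =>
      rw [PySem.Chars.join_cons_cons]
      intro hnil
      have := (hg w List.mem_cons_self).1
      simp [List.append_eq_nil_iff] at hnil

theorem rstrip_join (L : List (List Char)) : L ≠ [] → (∀ w ∈ L, goodW w) →
    PySem.Chars.rstrip (PySem.Chars.join [' '] L) = PySem.Chars.join [' '] L := by
  induction L with
  | nil => intro h _; exact absurd rfl h
  | cons w L ih =>
    intro _ hg
    cases L with
    | nil =>
      rw [PySem.Chars.join_singleton]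
      exact rstrip_of_all_nonspace w (hg w List.mem_cons_self).2
    | cons v L' =>
      have hjoin : PySem.Chars.join [' '] (w :: v :: L') = w ++ ([' '] ++ PySem.Chars.join [' '] (v :: L')) := by
        rw [PySem.Chars.join_cons_cons, List.append_assoc]
      have hrec := ih (by simp) (fun u hu => hg u (List.mem_cons_of_mem _ hu))
      have hJ : PySem.Chars.rstrip (PySem.Chars.join [' '] (v :: L')) ≠ [] := by
        rw [hrec]
        exact join_ne_nil _ (by simp) (fun u hu => hg u (List.mem_cons_of_mem _ hu))
      have h2 : PySem.Chars.rstrip ([' '] ++ PySem.Chars.join [' '] (v :: L'))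
          = [' '] ++ PySem.Chars.rstrip (PySem.Chars.join [' '] (v :: L')) :=
        rstrip_append_of_nonspace [' '] _ hJ
      rw [hjoin, rstrip_append_of_nonspace w _ (by rw [h2]; simp), h2, hrec]

theorem render (L : List (List Char)) (h : ∀ w ∈ L, goodW w) :
    PySem.Chars.strip (L.map (· ++ [' '])).flatten = PySem.Chars.join [' '] L := by
  cases L with
  | nil => simp [PySem.Chars.strip, PySem.Chars.lstrip, PySem.Chars.rstrip, PySem.Chars.join_nil]
  | cons w L' =>
    rw [flat_eq_join_sp _ (by simp)]
    have hgw := h w List.mem_cons_self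
    have hjoin : ∃ rest, PySem.Chars.join [' '] (w :: L') = w ++ rest := by
      cases L' with
      | nil => exact ⟨[], by rw [PySem.Chars.join_singleton, List.append_nil]⟩
      | cons v L'' => exact ⟨[' '] ++ PySem.Chars.join [' '] (v :: L''), by
          rw [PySem.Chars.join_cons_cons, List.append_assoc]⟩
    obtain ⟨rest, hrest⟩ := hjoin
    simp only [PySem.Chars.strip]
    rw [hrest, List.append_assoc, lstrip_of_head w (rest ++ [' ']) hgw, ← List.append_assoc,
      ← hrest, rstrip_append_sp, rstrip_join _ (by simp) h]


-- ===== VERDICT (by name: the statement is the Claim_ definition above) =====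
theorem replace_tokens_with_indexes_spec : Claim_equal_replace_tokens_with_indexes := by
  intro tokens lf _
  unfold Spec_replace_tokens_with_indexes
  unfold replace_tokens_with_indexes replace_tokens_with_indexes_alt
  obtain ⟨ha, _⟩ := foldA_spec tokens (PySem.Str.split₀ lf) "" 0
  apply String.toList_inj.mp
  rw [PySem.Str.toList_strip, ha]
  have hG : ((PySem.Str.split₀ lf).foldl (stepB (buildPos tokens)) ([], (0 : Int))).1
      = (outWT tokens 0 (PySem.Str.split₀ lf)).1 := by
    simpa using congrArg Prod.fst (foldB_spec tokens (PySem.Str.split₀ lf) [] 0)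
  simp only [PySem.Str.join, hG, String.toList_ofList]
  have hmm : (outWT tokens 0 (PySem.Str.split₀ lf)).1.map (fun w => w.toList ++ [' '])
      = ((outWT tokens 0 (PySem.Str.split₀ lf)).1.map String.toList).map (· ++ [' ']) := by
    rw [List.map_map]; rfl
  have hgood : ∀ w ∈ (outWT tokens 0 (PySem.Str.split₀ lf)).1.map String.toList, goodW w := by
    intro w hw
    obtain ⟨v, hv, rfl⟩ := List.mem_map.1 hw
    exact outWT_good tokens (PySem.Str.split₀ lf) 0 (split₀_good lf) v hv
  rw [show (("" : String).toList) = ([] : List Char) from rfl, List.nil_append, hmm,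
    render _ hgood]
  rfl
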